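-- pv_equiv track=rewrite | github.com/kilolonion/excelmanus | excelmanus/window_perception/adaptive.py | _match_prefix
-- ===== SOURCE A (Python) =====
-- def _match_prefix(prefix_map: dict[str, str], model_id: str) -> str:
--     candidates = [
--         (prefix, mode)
--         for prefix, mode in prefix_map.items()
--         if model_id.startswith(prefix)
--     ]
--     if not candidates:
--         return ""
--     candidates.sort(key=lambda item: len(item[0]), reverse=True)
--     return candidates[0][1]
-- ===== SOURCE B (Python) =====
-- def _match_prefix(prefix_map: dict[str, str], model_id: str) -> str:
--     best_len = -1
--     best_mode = ""
--     for prefix, mode in prefix_map.items():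
--         if model_id.startswith(prefix) and len(prefix) > best_len:
--             best_len = len(prefix)
--             best_mode = mode
--     return best_mode
-- ===== Notes on version B (the rewrite author's own statement) =====
-- stated objective: simpler
-- what changed: Replaces the candidate-list comprehension plus stable reverse sort with a single pass that maintains the running best (longest) matching prefix, updating only on strictly greater length so ties keep the first match exactly as the stable sort does.
import Mathlib
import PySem

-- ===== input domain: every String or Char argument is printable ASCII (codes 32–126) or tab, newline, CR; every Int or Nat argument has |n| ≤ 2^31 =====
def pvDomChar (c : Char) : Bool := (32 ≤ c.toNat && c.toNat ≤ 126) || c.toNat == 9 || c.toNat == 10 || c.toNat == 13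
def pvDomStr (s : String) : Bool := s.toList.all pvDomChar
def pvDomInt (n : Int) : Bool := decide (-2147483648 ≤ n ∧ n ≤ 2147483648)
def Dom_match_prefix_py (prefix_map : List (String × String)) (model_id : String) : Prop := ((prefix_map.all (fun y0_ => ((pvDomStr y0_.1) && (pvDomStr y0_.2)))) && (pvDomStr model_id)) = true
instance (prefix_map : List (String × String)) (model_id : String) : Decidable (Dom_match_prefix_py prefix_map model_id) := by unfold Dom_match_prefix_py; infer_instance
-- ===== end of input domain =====

-- B replaces A's candidate list + stable reverse sort by a single running-best pass (simpler, one pass).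


-- ===== PORT A =====
def match_prefix_py (prefix_map : List (String × String)) (model_id : String) : String :=
  let candidates := prefix_map.filter (fun item => PySem.Str.startswith model_id item.1)
  if candidates.isEmpty then ""
  else ((PySem.List.sorted candidates (fun item => PySem.Str.len item.1) true).headD ("", "")).2

-- ===== PORT B =====
def match_prefix_py_alt (prefix_map : List (String × String)) (model_id : String) : String :=
  (prefix_map.foldl
    (fun best item =>
      if PySem.Str.startswith model_id item.1 && decide (best.1 < PySem.Str.len item.1)
      then (PySem.Str.len item.1, item.2) else best)
    ((-1 : Int), "")).2

-- ===== PRECONDITION & SPEC =====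
def Spec_match_prefix_py (prefix_map : List (String × String)) (model_id : String) (out : String) : Prop := out = match_prefix_py_alt prefix_map model_id
instance (prefix_map : List (String × String)) (model_id : String) (out : String) : Decidable (Spec_match_prefix_py prefix_map model_id out) := by unfold Spec_match_prefix_py; infer_instance

-- ===== CLAIM (what is proved, stated in full; the proofs are below) =====
def Claim_equal_match_prefix_py : Prop := ∀ (prefix_map : List (String × String)) (model_id : String), Dom_match_prefix_py prefix_map model_id → Spec_match_prefix_py prefix_map model_id (match_prefix_py prefix_map model_id)

-- ===== LEMMAS AND PROOFS =====

-- key of a candidate: the prefix length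
def pvKey (it : String × String) : Int := PySem.Str.len it.1

-- B's step on an already-filtered candidate
def pvStep (best : Int × String) (it : String × String) : Int × String :=
  if best.1 < pvKey it then (pvKey it, it.2) else best

-- the insertion comparator of the stable reverse sort
def pvBef (a b : String × String) : Bool := decide (pvKey b < pvKey a)

-- invariant tying the sort accumulator's head to B's running best
def pvRel (acc : List (String × String)) (best : Int × String) : Prop :=
  (acc = [] ∧ best = (-1, "")) ∨ (∃ h t, acc = h :: t ∧ best = (pvKey h, h.2))

theorem pvKey_nonneg (it : String × String) : 0 ≤ pvKey it := by
  simp [pvKey, PySem.Str.len_eq]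

theorem pvInsertBy_cons (x h : String × String) (t : List (String × String)) :
    PySem.List.insertBy pvBef x (h :: t) =
      if pvBef x h then x :: h :: t else h :: PySem.List.insertBy pvBef x t := by
  simp [PySem.List.insertBy]

theorem pvRel_step (acc : List (String × String)) (best : Int × String) (x : String × String)
    (hr : pvRel acc best) : pvRel (PySem.List.insertBy pvBef x acc) (pvStep best x) := by
  rcases hr with ⟨hacc, hbest⟩ | ⟨h, t, hacc, hbest⟩
  · subst hacc; subst hbest
    right
    refine ⟨x, [], by simp [PySem.List.insertBy], ?_⟩
    have := pvKey_nonneg x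
    simp [pvStep]
    omega
  · subst hacc; subst hbest
    rw [pvInsertBy_cons]
    by_cases hlt : pvKey h < pvKey x
    · have hb : pvBef x h = true := by simp [pvBef, hlt]
      rw [hb]
      right
      exact ⟨x, h :: t, by simp, by simp [pvStep, hlt]⟩
    · have hb : pvBef x h = false := by simp [pvBef]; omega
      rw [hb]
      right
      refine ⟨h, PySem.List.insertBy pvBef x t, by simp, ?_⟩
      simp [pvStep]
      omega

theorem pvRel_foldl (l : List (String × String)) :
    ∀ (acc : List (String × String)) (best : Int × String), pvRel acc best →
      pvRel (l.foldl (fun acc x => PySem.List.insertBy pvBef x acc) acc) (l.foldl pvStep best) := by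
  induction l with
  | nil => intro acc best h; exact h
  | cons x xs ih =>
      intro acc best h
      exact ih _ _ (pvRel_step acc best x h)

-- B's fold over the full list equals the simple fold over the filtered candidates
theorem pvFold_filter (model_id : String) (l : List (String × String)) :
    ∀ best : Int × String,
      l.foldl
        (fun best item =>
          if PySem.Str.startswith model_id item.1 && decide (best.1 < PySem.Str.len item.1)
          then (PySem.Str.len item.1, item.2) else best) best =
      (l.filter (fun item => PySem.Str.startswith model_id item.1)).foldl pvStep best := by
  induction l with
  | nil => intro best; rfl
  | cons x xs ih =>
      intro best
      by_cases hc : PySem.Str.startswith model_id x.1 = true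
      · simp only [List.foldl_cons, List.filter_cons, hc, if_pos]
        rw [ih]
        congr 1
        simp [pvStep, pvKey]
      · simp only [List.foldl_cons, List.filter_cons, hc, Bool.false_and, Bool.false_eq_true,
          if_false]
        exact ih best

-- ===== VERDICT (by name: the statement is the Claim_ definition above) =====
theorem match_prefix_py_spec : Claim_equal_match_prefix_py := by
  intro prefix_map model_id _
  unfold Spec_match_prefix_py match_prefix_py match_prefix_py_alt
  rw [pvFold_filter]
  set cand := prefix_map.filter (fun item => PySem.Str.startswith model_id item.1) with hcand
  have hsorted : PySem.List.sorted cand (fun item => PySem.Str.len item.1) true =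
      cand.foldl (fun acc x => PySem.List.insertBy pvBef x acc) [] := by
    rw [PySem.List.sorted_rev_eq_foldl_insertBy]
    rfl
  have hrel := pvRel_foldl cand [] ((-1 : Int), "") (Or.inl ⟨rfl, rfl⟩)
  rcases hrel with ⟨hnil, hbest⟩ | ⟨h, t, hcons, hbest⟩
  · have hce : cand = [] := by
      have := (PySem.List.sorted_eq_nil_iff (xs := cand)
        (key := fun item => PySem.Str.len item.1) (rev := true)).mp (by rw [hsorted]; exact hnil)
      exact this
    rw [hce] at hbest ⊢
    simp [hbest]
  · have hne : ¬ cand.isEmpty := by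
      intro hE
      have hce : cand = [] := by simpa [List.isEmpty_iff] using hE
      rw [hce] at hcons
      simp at hcons
    simp only [hne, if_neg, Bool.not_eq_true] at *
    rw [hsorted, hcons, hbest]
    simp
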